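-- pv_equiv track=rewrite | github.com/MomorioUHT/AetheriaDomainOfMoonshadowAndStarlight | [Hard]-ArthersLuminousOresConundrum.py | tiltLeft
-- ===== SOURCE A (Python) =====
-- def tiltLeft(grid: list):
--     for row in range(len(grid)):
--         stack = []
--         for col in range(len(grid[row])):
--             if grid[row][col] != ".":
--                 stack.append(grid[row][col])
--
--         for col in range(len(grid[row])):
--             grid[row][col] = stack[col] if col < len(stack) else "."
--
--     return grid
-- ===== SOURCE B (Python) =====
-- def tiltLeft(grid: list):
--     # stable in-place sort: cells equal to "." (key True) sort after all
--     # non-"." cells (key False), preserving relative order of each group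
--     for row in grid:
--         row.sort(key=".".__eq__)
--     return grid
-- ===== Notes on version B (the rewrite author's own statement) =====
-- stated objective: idiomatic
-- what changed: Replaces the explicit compact-then-pad loops (auxiliary stack plus rebuild pass) with a stable in-place sort of each row keyed by 'cell == "."', so empty cells sink to the end and the compaction is delegated to the sort.
import Mathlib
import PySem

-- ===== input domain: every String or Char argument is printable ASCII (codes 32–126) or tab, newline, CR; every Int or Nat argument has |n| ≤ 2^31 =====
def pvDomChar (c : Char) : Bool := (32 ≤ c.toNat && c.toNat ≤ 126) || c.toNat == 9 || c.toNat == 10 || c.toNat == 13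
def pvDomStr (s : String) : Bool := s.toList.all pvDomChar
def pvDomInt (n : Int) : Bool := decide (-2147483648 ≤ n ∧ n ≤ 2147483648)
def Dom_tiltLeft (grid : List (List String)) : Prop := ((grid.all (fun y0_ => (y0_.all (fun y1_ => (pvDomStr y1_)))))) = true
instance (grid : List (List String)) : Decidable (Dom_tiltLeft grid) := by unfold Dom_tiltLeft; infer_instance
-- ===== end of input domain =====

-- B replaces A's explicit compact-then-pad loops by a stable in-place sort of each row keyed by
-- cell == "." (idiomatic; both Pythons mutate the grid in place — equivalence here is about the returned value).

-- ===== PORT A =====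
-- per-row body of A: build 'stack' of non-'.' cells, then rewrite every cell from it
def tiltRowA (row : List String) : List String :=
  let stack := (List.range row.length).foldl
    (fun s col => if row.getD col "" ≠ "." then s ++ [row.getD col ""] else s) []
  (List.range row.length).foldl
    (fun r col => r.set col (if col < stack.length then stack.getD col "" else ".")) row

def tiltLeft (grid : List (List String)) : List (List String) :=
  grid.map tiltRowA

-- ===== PORT B =====
-- per-row body of B: row.sort(key=".".__eq__) — Python's stable sort with a boolean key;
-- the bool key False/True is ported as the Int key 0/1 (Python orders booleans exactly as 0 < 1)
def tiltRowB (row : List String) : List String :=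
  PySem.List.sorted row (fun s => if s = "." then (1 : Int) else 0) false

def tiltLeft_alt (grid : List (List String)) : List (List String) :=
  grid.map tiltRowB

-- ===== PRECONDITION & SPEC =====
def Spec_tiltLeft (grid : List (List String)) (out : List (List String)) : Prop := out = tiltLeft_alt grid
instance (grid : List (List String)) (out : List (List String)) : Decidable (Spec_tiltLeft grid out) := by unfold Spec_tiltLeft; infer_instance

-- ===== CLAIM (what is proved, stated in full; the proofs are below) =====
def Claim_equal_tiltLeft : Prop := ∀ (grid : List (List String)), Dom_tiltLeft grid → Spec_tiltLeft grid (tiltLeft grid)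

-- ===== LEMMAS AND PROOFS =====

-- A's first loop builds exactly the filter of the scanned prefix
theorem stackA_eq (row : List String) (k : Nat) (hk : k ≤ row.length) :
    (List.range k).foldl
      (fun s col => if row.getD col "" ≠ "." then s ++ [row.getD col ""] else s) []
      = (row.take k).filter (· ≠ ".") := by
  induction k with
  | zero => simp
  | succ n ih =>
    have hn : n ≤ row.length := Nat.le_of_succ_le hk
    have hlt : n < row.length := hk
    have hg : row.getD n "" = row[n] := List.getD_eq_getElem _ _ hlt
    have ht : row.take (n+1) = row.take n ++ [row[n]] := by
      rw [List.take_add_one, List.getElem?_eq_getElem hlt]; rfl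
    rw [List.range_succ, List.foldl_append, ih hn]
    simp only [List.foldl_cons, List.foldl_nil, hg]
    rw [ht, List.filter_append]
    by_cases h : row[n] = "." <;> simp [h]

-- A's second loop with an arbitrary per-index value function
theorem setA_eq (row : List String) (v : Nat → String) (k : Nat) (hk : k ≤ row.length) :
    (List.range k).foldl (fun r col => r.set col (v col)) row
      = (List.range k).map v ++ row.drop k := by
  induction k with
  | zero => simp
  | succ n ih =>
    have hn : n ≤ row.length := Nat.le_of_succ_le hk
    have hlt : n < row.length := hk
    rw [List.range_succ, List.foldl_append, ih hn]
    simp only [List.foldl_cons, List.foldl_nil, List.map_append, List.map_cons, List.map_nil]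
    rw [List.set_append_right _ _ (by simp)]
    simp only [List.length_map, List.length_range, Nat.sub_self]
    rw [List.drop_eq_getElem_cons hlt, List.set_cons_zero]
    simp

-- the padded value function equals stack ++ replicate
theorem pad_eq (row : List String) (stack : List String) (hs : stack.length ≤ row.length) :
    (List.range row.length).map
        (fun col => if col < stack.length then stack.getD col "" else ".")
      = stack ++ List.replicate (row.length - stack.length) "." := by
  apply List.ext_getElem
  · simp [Nat.add_sub_cancel' hs]
  · intro i h1 h2
    simp only [List.getElem_map, List.getElem_range]
    by_cases hi : i < stack.length
    · rw [if_pos hi, List.getElem_append_left hi, List.getD_eq_getElem _ _ hi]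
    · rw [if_neg hi, List.getElem_append_right (Nat.le_of_not_lt hi)]
      simp

theorem tiltRowA_eq (row : List String) :
    tiltRowA row
      = row.filter (· ≠ ".") ++ List.replicate (row.length - (row.filter (· ≠ ".")).length) "." := by
  unfold tiltRowA
  have hs : (row.filter (· ≠ ".")).length ≤ row.length := List.length_filter_le _ _
  rw [stackA_eq row row.length le_rfl, List.take_length,
    setA_eq row _ row.length le_rfl, List.drop_length, List.append_nil,
    pad_eq row _ hs]

-- ---- B side: the stable insertion sort with the 0/1 key separates non-dots from dots ----

-- abbreviation for B's comparison
def dotBefore (x y : String) : Bool :=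
  decide ((if x = "." then (1 : Int) else 0) < (if y = "." then (1 : Int) else 0))

theorem insertBy_skip (x : String) (A D : List String)
    (hA : ∀ a ∈ A, dotBefore x a = false) :
    PySem.List.insertBy dotBefore x (A ++ D)
      = A ++ PySem.List.insertBy dotBefore x D := by
  induction A with
  | nil => simp
  | cons a as ih =>
    have ha : dotBefore x a = false := hA a (by simp)
    simp only [List.cons_append, PySem.List.insertBy, ha]
    simp only [Bool.false_eq_true, if_false]
    exact congrArg (a :: ·) (ih (fun b hb => hA b (by simp [hb])))

theorem sorted_dot_eq (row : List String) :
    tiltRowB row = row.filter (· ≠ ".") ++ row.filter (· = ".") := by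
  unfold tiltRowB
  induction row using List.reverseRecOn with
  | nil => rfl
  | append_singleton xs x ih =>
    have hfold : PySem.List.sorted (xs ++ [x]) (fun s => if s = "." then (1 : Int) else 0) false
        = PySem.List.insertBy dotBefore x
            (PySem.List.sorted xs (fun s => if s = "." then (1 : Int) else 0) false) := by
      unfold PySem.List.sorted dotBefore
      simp [List.foldl_append]
    rw [hfold, ih]
    by_cases hx : x = "."
    · -- key x = 1: never before anything with key ≤ 1 → appended at the end
      have hA : ∀ a ∈ (xs.filter (· ≠ ".") ++ xs.filter (· = ".")) ++ ([] : List String),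
          dotBefore x a = false := by
        intro a _
        by_cases h : a = "." <;> simp [dotBefore, hx, h]
      have h1 := insertBy_skip x _ [] hA
      simp only [List.append_nil] at h1
      rw [h1]
      simp [PySem.List.insertBy, List.filter_append, hx]
    · -- key x = 0: slips past the non-dots (key 0), lands before the first dot (key 1)
      have hA : ∀ a ∈ xs.filter (· ≠ "."), dotBefore x a = false := by
        intro a ha
        have ha' : ¬ a = "." := by simpa using (List.of_mem_filter ha)
        simp [dotBefore, hx, ha']
      rw [insertBy_skip x _ _ hA]
      have hD : PySem.List.insertBy dotBefore x (xs.filter (· = "."))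
          = x :: xs.filter (· = ".") := by
        cases hD : xs.filter (· = ".") with
        | nil => rfl
        | cons d ds =>
          have hd : d = "." := by
            have := List.of_mem_filter (l := xs) (p := (· = "."))
              (a := d) (by rw [hD]; simp)
            simpa using this
          simp [PySem.List.insertBy, dotBefore, hx, hd]
      rw [hD, List.filter_append, List.filter_append]
      simp [hx]
  termination_by row.length

theorem dots_replicate (row : List String) :
    row.filter (· = ".") = List.replicate ((row.filter (· = ".")).length) "." := by
  rw [List.eq_replicate_length]
  intro b hb
  simpa using List.of_mem_filter hb

theorem filter_length_split (row : List String) :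
    (row.filter (· ≠ ".")).length + (row.filter (· = ".")).length = row.length := by
  induction row with
  | nil => rfl
  | cons a as ih =>
    simp only [ne_eq, decide_not] at ih ⊢
    simp only [List.filter_cons]
    by_cases h : a = "." <;> simp [h] <;> omega

theorem tiltRowB_eq (row : List String) :
    tiltRowB row
      = row.filter (· ≠ ".") ++ List.replicate (row.length - (row.filter (· ≠ ".")).length) "." := by
  have h : (row.filter (· = ".")).length = row.length - (row.filter (· ≠ ".")).length := by
    have := filter_length_split row; omega
  rw [sorted_dot_eq, dots_replicate (row := row), h]

-- ===== VERDICT (by name: the statement is the Claim_ definition above) =====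
theorem tiltLeft_spec : Claim_equal_tiltLeft := by
  intro grid _
  unfold Spec_tiltLeft tiltLeft tiltLeft_alt
  apply List.map_congr_left
  intro row _
  rw [tiltRowA_eq, tiltRowB_eq]
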